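-- pv_equiv track=rewrite | github.com/fOstroski76/FER-labosi | AkGod2022-2023/UUUI/Lab3/solution3_clean.py | reduceMatrix
-- ===== SOURCE A (Python) =====
-- import copy
--
-- def reduceMatrix( inputMatrix, reducingValue, resultFeature) :
--
--     matrix_copy = copy.deepcopy(inputMatrix)
--     matrixCopy_copy = copy.deepcopy(matrix_copy)
--     indexesToNotRemove = list()
--
--     for ele in matrix_copy:
--
--         if ele == resultFeature:
--
--             rowsByColumn = matrix_copy[ele][0]
--
--             for elem in rowsByColumn.keys() :
--
--                 if rowsByColumn[elem] == reducingValue :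
--                     indexesToNotRemove.append(elem)
--
--
--     for ele in matrix_copy :
--         rowsByColumn = matrix_copy[ele][0]
--         rowsByColumnCopy = matrixCopy_copy[ele][0]
--
--         for key in rowsByColumn.keys() :
--             if key not in indexesToNotRemove :
--                 rowsByColumnCopy[key] = None
--
--
--     for ele in list(matrixCopy_copy.values()):
--         tempDict = ele[0]
--         tempDict = {key: value for key, value in tempDict.items() if value is not None}
--         ele[0] = tempDict
--
--     return matrixCopy_copy
-- ===== SOURCE B (Python) =====
-- def reduceMatrix(inputMatrix, reducingValue, resultFeature):
--     rowsOfResult = inputMatrix.get(resultFeature)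
--     keep = set() if rowsOfResult is None else \
--         {k for k, v in rowsOfResult[0].items() if v == reducingValue}
--     return {feature: [{k: v for k, v in rows[0].items() if k in keep}] + rows[1:]
--             for feature, rows in inputMatrix.items()}
-- ===== Notes on version B (the rewrite author's own statement) =====
-- stated objective: simpler
-- what changed: A deep-copies the matrix twice, overwrites unkept keys with None sentinels in a second pass and strips the Nones in a third; B builds one keep-set from the resultFeature row and rebuilds each entry in a single filtering comprehension, with no sentinels and no mutation passes.
import Mathlib
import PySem

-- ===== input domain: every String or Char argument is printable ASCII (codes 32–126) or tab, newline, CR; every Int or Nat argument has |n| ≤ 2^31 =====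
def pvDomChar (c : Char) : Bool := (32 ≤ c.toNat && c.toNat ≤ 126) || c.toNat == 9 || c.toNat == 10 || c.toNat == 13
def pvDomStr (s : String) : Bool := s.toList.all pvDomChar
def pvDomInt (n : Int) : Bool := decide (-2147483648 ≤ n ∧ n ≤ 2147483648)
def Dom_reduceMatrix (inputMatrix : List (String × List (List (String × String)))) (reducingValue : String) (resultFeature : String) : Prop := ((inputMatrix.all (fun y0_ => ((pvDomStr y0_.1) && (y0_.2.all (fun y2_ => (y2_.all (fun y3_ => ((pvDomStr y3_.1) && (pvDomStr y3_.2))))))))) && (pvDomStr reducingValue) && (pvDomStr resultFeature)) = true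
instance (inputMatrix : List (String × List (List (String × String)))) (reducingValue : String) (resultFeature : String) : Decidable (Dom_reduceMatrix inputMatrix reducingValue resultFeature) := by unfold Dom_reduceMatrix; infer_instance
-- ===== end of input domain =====

-- B replaces A's three passes (mark unkept keys with None in a deep copy, then strip the Nones)
-- by one keep-set and a single filtering comprehension per row; return values are equal (A returns
-- a deep copy while B shares untouched inner dicts with the input — return-value equivalence only).

-- ===== PORT A =====
def reduceMatrix (inputMatrix : List (String × List (List (String × String)))) (reducingValue : String) (resultFeature : String) : List (String × List (List (String × String))) :=
  -- first loop: collect the keys whose value under resultFeature equals reducingValue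
  let indexesToNotRemove : List String :=
    inputMatrix.foldl (fun acc ele =>
      if ele.1 == resultFeature then
        (ele.2.headD []).foldl (fun acc2 elem =>
          if elem.2 == reducingValue then acc2 ++ [elem.1] else acc2) acc
      else acc) []
  -- second loop: in a copy, overwrite with None every key not in indexesToNotRemove
  let marked : List (String × (List (String × Option String) × List (List (String × String)))) :=
    inputMatrix.map (fun ele =>
      let rowsByColumn := ele.2.headD []
      let rowsByColumnCopy : PySem.Dict String (Option String) :=
        PySem.Dict.mk (rowsByColumn.map (fun q => (q.1, some q.2)))
      let d := rowsByColumn.foldl (fun d q =>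
        if indexesToNotRemove.contains q.1 then d else d.insert q.1 none) rowsByColumnCopy
      (ele.1, (d.items, ele.2.tail)))
  -- third loop: strip the None values and assign the dict back at position 0
  marked.map (fun ele =>
    (ele.1, (ele.2.1.filterMap (fun q => q.2.map (fun v => (q.1, v)))) :: ele.2.2))

-- ===== PORT B =====
def reduceMatrix_alt (inputMatrix : List (String × List (List (String × String)))) (reducingValue : String) (resultFeature : String) : List (String × List (List (String × String))) :=
  let keep : PySem.Set String :=
    match inputMatrix.find? (fun p => p.1 == resultFeature) with
    | some p => PySem.Set.ofList ((p.2.headD []).filterMap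
        (fun q => if q.2 == reducingValue then some q.1 else none))
    | none => PySem.Set.ofList []
  inputMatrix.map (fun p =>
    (p.1, ((p.2.headD []).filter (fun q => keep.contains q.1))
            :: PySem.List.slice p.2 (some 1) none))

-- ===== PRECONDITION & SPEC =====
-- Every rows list must be nonempty: A does rows[0] on each and raises IndexError on [].
-- Key lists must be duplicate-free (top level and each row's dict): the arguments are Python
-- dicts, whose association lists never carry a duplicate key, so nothing Python sees is excluded.
def Pre_reduceMatrix (inputMatrix : List (String × List (List (String × String)))) (reducingValue : String) (resultFeature : String) : Prop :=
  (∀ p ∈ inputMatrix, p.2 ≠ []) ∧ (inputMatrix.map Prod.fst).Nodup ∧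
    (∀ p ∈ inputMatrix, ((p.2.headD []).map Prod.fst).Nodup)
instance (inputMatrix : List (String × List (List (String × String)))) (reducingValue : String) (resultFeature : String) : Decidable (Pre_reduceMatrix inputMatrix reducingValue resultFeature) := by unfold Pre_reduceMatrix; infer_instance

def pvWitness_reduceMatrix : (List (String × List (List (String × String)))) × String × String :=
  ([("f", [[("a", "x"), ("b", "y")]]), ("g", [[("a", "1"), ("b", "2")]])], "x", "f")

def Spec_reduceMatrix (inputMatrix : List (String × List (List (String × String)))) (reducingValue : String) (resultFeature : String) (out : List (String × List (List (String × String)))) : Prop := out = reduceMatrix_alt inputMatrix reducingValue resultFeature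
instance (inputMatrix : List (String × List (List (String × String)))) (reducingValue : String) (resultFeature : String) (out : List (String × List (List (String × String)))) : Decidable (Spec_reduceMatrix inputMatrix reducingValue resultFeature out) := by unfold Spec_reduceMatrix; infer_instance

-- ===== CLAIM (what is proved, stated in full; the proofs are below) =====
def Claim_equal_reduceMatrix : Prop := ∀ (inputMatrix : List (String × List (List (String × String)))) (reducingValue : String) (resultFeature : String), Dom_reduceMatrix inputMatrix reducingValue resultFeature → Pre_reduceMatrix inputMatrix reducingValue resultFeature → Spec_reduceMatrix inputMatrix reducingValue resultFeature (reduceMatrix inputMatrix reducingValue resultFeature)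

-- ===== LEMMAS AND PROOFS =====

-- strip applied to an if-marked pair list is a plain filter
lemma pv_filterMap_strip (c : String → Bool) (l : List (String × String)) :
    (l.map (fun q => ((q.1 : String), if c q.1 then some q.2 else (none : Option String)))).filterMap
        (fun q => q.2.map (fun v => (q.1, v)))
    = l.filter (fun q => c q.1) := by
  induction l with
  | nil => rfl
  | cons a l ih =>
    by_cases h : c a.1 <;> simp [h, ih]

-- a keep-key comprehension is map-fst of a filter
lemma pv_filterMap_keys (rv : String) (l : List (String × String)) :
    l.filterMap (fun q => if q.2 = rv then some q.1 else (none : Option String))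
    = (l.filter (fun q => q.2 == rv)).map Prod.fst := by
  induction l with
  | nil => rfl
  | cons a l ih =>
    by_cases h : a.2 = rv <;> simp [h, ih]

-- A's marking loop overwrites, in place, exactly the unkept keys of a duplicate-free dict
lemma pv_mark_items (c : String → Bool) :
    ∀ (suf : List (String × String)) (pre : List (String × Option String)),
      (∀ q ∈ suf, ∀ r ∈ pre, r.1 ≠ q.1) → (suf.map Prod.fst).Nodup →
      (suf.foldl (fun d q => if c q.1 then d else d.insert q.1 none)
        (PySem.Dict.mk (pre ++ suf.map (fun q => (q.1, some q.2))))).items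
      = pre ++ suf.map (fun q => (q.1, if c q.1 then some q.2 else none)) := by
  intro suf
  induction suf with
  | nil => intro pre _ _; simp
  | cons q suf ih =>
    intro pre hdisj hnd
    rw [List.map_cons] at hnd
    have hq : q.1 ∉ suf.map Prod.fst := (List.nodup_cons.mp hnd).1
    have hnd' : (suf.map Prod.fst).Nodup := (List.nodup_cons.mp hnd).2
    simp only [List.map_cons, List.foldl_cons]
    by_cases hc : c q.1
    · rw [if_pos hc]
      have e1 : pre ++ (q.1, some q.2) :: List.map (fun q => ((q.1 : String), some q.2)) suf
          = (pre ++ [(q.1, some q.2)]) ++ List.map (fun q => (q.1, some q.2)) suf := by simp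
      rw [e1, ih (pre ++ [(q.1, some q.2)]) ?hd hnd']
      · simp [hc]
      case hd =>
        intro a ha r hr
        rcases List.mem_append.mp hr with h1 | h2
        · exact hdisj a (List.mem_cons_of_mem _ ha) r h1
        · have : r = (q.1, some q.2) := by simpa using h2
          subst this
          intro hbad
          exact hq (hbad ▸ List.mem_map_of_mem ha)
    · rw [if_neg hc]
      have hcont : (PySem.Dict.mk (pre ++ (q.1, some q.2) ::
          List.map (fun q => ((q.1 : String), some q.2)) suf)).contains q.1 = true := by
        rw [PySem.Dict.contains_mk]; simp
      have hins : (PySem.Dict.mk (pre ++ (q.1, some q.2) ::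
            List.map (fun q => ((q.1 : String), some q.2)) suf)).insert q.1 none
          = PySem.Dict.mk ((pre ++ [(q.1, (none : Option String))]) ++
            List.map (fun q => (q.1, some q.2)) suf) := by
        apply PySem.Dict.ext
        rw [PySem.Dict.items_insert_of_contains _ _ hcont]
        show List.map ?g (pre ++ (q.1, some q.2) :: List.map ?lift suf) = _
        simp only [List.map_append, List.map_cons, List.map_map, List.append_assoc,
          List.singleton_append]
        congr 1
        · have h1 : ∀ r ∈ pre,
              (fun p => if (p.1 == q.1) = true then ((q.1 : String), (none : Option String)) else p) r
                = id r := by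
            intro r hr
            have hne := hdisj q (List.mem_cons_self) r hr
            simp [hne]
          rw [List.map_congr_left h1, List.map_id]
        · congr 1
          · simp
          · apply List.map_congr_left
            intro a ha
            have hne : a.1 ≠ q.1 := by
              intro hbad
              exact hq (hbad ▸ List.mem_map_of_mem ha)
            simp [Function.comp, hne]
      rw [hins, ih (pre ++ [(q.1, none)]) ?hd hnd']
      · simp [hc]
      case hd =>
        intro a ha r hr
        rcases List.mem_append.mp hr with h1 | h2
        · exact hdisj a (List.mem_cons_of_mem _ ha) r h1
        · have : r = (q.1, none) := by simpa using h2
          subst this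
          intro hbad
          exact hq (hbad ▸ List.mem_map_of_mem ha)

-- the outer collecting loop is insensitive to entries whose key is not resultFeature
lemma pv_keep_skip (rv rf : String) :
    ∀ (m : List (String × List (List (String × String)))) (acc : List String),
      (∀ p ∈ m, (p.1 == rf) = false) →
      m.foldl (fun acc ele => if ele.1 == rf then
          (ele.2.headD []).foldl (fun acc2 elem => if elem.2 == rv then acc2 ++ [elem.1] else acc2) acc
        else acc) acc = acc := by
  intro m
  induction m with
  | nil => intro acc _; rfl
  | cons p m ih =>
    intro acc h
    simp only [List.foldl_cons, h p (by simp)]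
    exact ih acc (fun q hq => h q (by simp [hq]))

-- with duplicate-free top-level keys, A's collecting loop reads exactly the entry find? returns
lemma pv_keep_eq (rv rf : String) :
    ∀ (m : List (String × List (List (String × String)))) (acc : List String),
      (m.map Prod.fst).Nodup →
      m.foldl (fun acc ele => if ele.1 == rf then
          (ele.2.headD []).foldl (fun acc2 elem => if elem.2 == rv then acc2 ++ [elem.1] else acc2) acc
        else acc) acc
      = acc ++ (match m.find? (fun p => p.1 == rf) with
          | some p => ((p.2.headD []).filter (fun q => q.2 == rv)).map Prod.fst
          | none => []) := by
  intro m
  induction m with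
  | nil => intro acc _; simp
  | cons p m ih =>
    intro acc hnd
    have hq : p.1 ∉ m.map Prod.fst := (List.nodup_cons.mp (by simpa using hnd)).1
    have hnd' : (m.map Prod.fst).Nodup := (List.nodup_cons.mp (by simpa using hnd)).2
    simp only [List.foldl_cons]
    by_cases h : p.1 == rf
    · rw [if_pos h]
      rw [PySem.List.foldl_append_if (fun q => q.2 == rv) Prod.fst (p.2.headD []) acc]
      rw [pv_keep_skip rv rf m _ ?hskip]
      · simp [h]
      case hskip =>
        intro q hqm
        by_contra hbad
        exact hq (by
          have : q.1 = rf := by simpa using (Bool.not_eq_false _).mp hbad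
          have hpr : p.1 = rf := by simpa using h
          rw [hpr, ← this]; exact List.mem_map_of_mem hqm)
    · rw [if_neg (by simpa using h)]
      rw [ih acc hnd']
      simp [h]


-- per entry: A's mark-then-strip on row0 is one filter by the keep list
lemma pv_entry (c : List String) (row : List (String × String))
    (hnd : (row.map Prod.fst).Nodup) :
    ((row.foldl (fun d q => if c.contains q.1 then d else d.insert q.1 none)
        (PySem.Dict.mk (row.map (fun q => (q.1, some q.2))))).items).filterMap
        (fun q => q.2.map (fun v => (q.1, v)))
    = row.filter (fun q => c.contains q.1) := by
  have h := pv_mark_items (fun k => c.contains k) row [] (by simp) hnd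
  simp only [List.nil_append] at h
  rw [h, pv_filterMap_strip]

-- ===== VERDICT (by name: the statement is the Claim_ definition above) =====
theorem reduceMatrix_spec : Claim_equal_reduceMatrix := by
  intro m rv rf _ hpre
  obtain ⟨hne, hndK, hndR⟩ := hpre
  show reduceMatrix m rv rf = reduceMatrix_alt m rv rf
  have hkeep : ∀ x : String,
      (m.foldl (fun acc ele => if ele.1 == rf then
          (ele.2.headD []).foldl (fun acc2 elem => if elem.2 == rv then acc2 ++ [elem.1] else acc2) acc
        else acc) []).contains x
      = (match m.find? (fun p : String × List (List (String × String)) => p.1 == rf) with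
          | some p => PySem.Set.ofList ((p.2.headD []).filterMap
              (fun q : String × String => if q.2 == rv then some q.1 else none))
          | none => PySem.Set.ofList []).contains x := by
    intro x
    rw [pv_keep_eq rv rf m [] hndK]
    cases hfind : m.find? (fun p => p.1 == rf) with
    | none => simp
    | some p0 =>
      simp only [List.nil_append]
      rw [show (fun q : String × String => if q.2 == rv then some q.1 else (none : Option String))
            = (fun q => if q.2 = rv then some q.1 else none) from by funext q; simp,
          pv_filterMap_keys]
      rw [List.contains_eq_mem, PySem.Set.contains_eq_decide]
      simp [PySem.Set.mem_ofList]
  simp only [reduceMatrix, reduceMatrix_alt, List.map_map]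
  apply List.map_congr_left
  intro p hp
  simp only [Function.comp_apply]
  rw [PySem.List.slice_from_one, pv_entry _ _ (hndR p hp)]
  exact congrArg (fun r => (p.1, r :: p.2.tail))
    (List.filter_congr (fun q _ => hkeep q.1))
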